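-- pv_equiv track=rewrite | github.com/kangyeonwoo0921/ppp2025 | ppp2025/hw10/weather.py | rain_events
-- ===== SOURCE A (Python) =====
-- def rain_events(rainfalls):
--     events = []
--     total = 0
--     for rain in rainfalls:
--         if rain > 0:
--             total += rain
--         else:
--             if total > 0:
--                 events.append(total)
--             total = 0
--     if total > 0:
--         events.append(total)
--     return events
-- ===== SOURCE B (Python) =====
-- def rain_events(rainfalls):
--     # Span-based grouping: find each maximal run of positive values and sum it,
--     # instead of carrying a running total with a trailing flush.
--     events = []
--     i = 0
--     n = len(rainfalls)
--     while i < n: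
--         if rainfalls[i] > 0:
--             j = i
--             while j < n and rainfalls[j] > 0:
--                 j += 1
--             events.append(sum(rainfalls[i:j]))
--             i = j
--         else:
--             i += 1
--     return events
-- ===== Notes on version B (the rewrite author's own statement) =====
-- stated objective: alternative
-- what changed: Replaces the single-pass running-total-with-trailing-flush accumulator by span-based grouping: each maximal run of positive values is located and summed directly, no flush state.
import Mathlib
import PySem

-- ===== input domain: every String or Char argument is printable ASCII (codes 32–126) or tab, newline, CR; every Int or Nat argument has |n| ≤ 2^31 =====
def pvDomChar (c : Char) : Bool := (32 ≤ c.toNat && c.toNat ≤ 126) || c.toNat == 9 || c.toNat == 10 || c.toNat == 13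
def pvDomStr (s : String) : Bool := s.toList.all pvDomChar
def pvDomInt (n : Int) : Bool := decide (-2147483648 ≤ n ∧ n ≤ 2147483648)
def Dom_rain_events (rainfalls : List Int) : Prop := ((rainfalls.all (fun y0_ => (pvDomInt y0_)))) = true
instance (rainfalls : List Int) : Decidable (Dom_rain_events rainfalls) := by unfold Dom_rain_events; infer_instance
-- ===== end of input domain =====

-- B replaces A's running-total accumulator (with trailing flush) by span-based grouping:
-- each maximal positive run is taken and summed directly. Alternative decomposition, same cost.


-- ===== PORT A =====
-- A's for-loop over (events, total), then the trailing flush.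
def rainLoopA : List Int → List Int → Int → List Int
  | [], events, total => if total > 0 then events ++ [total] else events
  | rain :: rest, events, total =>
    if rain > 0 then rainLoopA rest events (total + rain)
    else rainLoopA rest (if total > 0 then events ++ [total] else events) 0

def rain_events (rainfalls : List Int) : List Int := rainLoopA rainfalls [] 0

-- ===== PORT B =====
-- B: scan to the next positive element, sum its maximal positive run, continue past it.
def rainGroupsB : List Int → List Int
  | [] => []
  | r :: rs =>
    if 0 < r then
      ((r :: rs).takeWhile (fun x => decide (0 < x))).sum
        :: rainGroupsB ((r :: rs).dropWhile (fun x => decide (0 < x)))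
    else rainGroupsB rs
termination_by l => l.length
decreasing_by
  · simp only [List.dropWhile_cons, decide_eq_true_eq, *, if_pos]
    exact Nat.lt_succ_of_le (List.length_dropWhile_le _ _)
  · simp

def rain_events_alt (rainfalls : List Int) : List Int := rainGroupsB rainfalls

-- ===== PRECONDITION & SPEC =====
def Spec_rain_events (rainfalls : List Int) (out : List Int) : Prop := out = rain_events_alt rainfalls
instance (rainfalls : List Int) (out : List Int) : Decidable (Spec_rain_events rainfalls out) := by unfold Spec_rain_events; infer_instance

-- ===== CLAIM (what is proved, stated in full; the proofs are below) =====
def Claim_equal_rain_events : Prop := ∀ (rainfalls : List Int), Dom_rain_events rainfalls → Spec_rain_events rainfalls (rain_events rainfalls)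

-- ===== LEMMAS AND PROOFS =====

-- The events list is only ever appended to.
theorem rainLoopA_append (l : List Int) : ∀ (ev : List Int) (t : Int),
    rainLoopA l ev t = ev ++ rainLoopA l [] t := by
  induction l with
  | nil => intro ev t; simp only [rainLoopA]; split <;> simp
  | cons r rs ih =>
    intro ev t
    simp only [rainLoopA]
    split
    · exact ih ev _
    · split
      · rw [ih (ev ++ [t]), ih ([] ++ [t])]; simp
      · exact ih ev 0

-- Joint characterisation of A's loop by B's grouping.
theorem rainLoopA_eq (l : List Int) :
    rainLoopA l [] 0 = rainGroupsB l ∧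
    ∀ t : Int, 0 < t →
      rainLoopA l [] t
        = (t + (l.takeWhile (fun x => decide (0 < x))).sum)
            :: rainGroupsB (l.dropWhile (fun x => decide (0 < x))) := by
  induction l with
  | nil =>
    constructor
    · simp [rainLoopA, rainGroupsB]
    · intro t ht; simp [rainLoopA, rainGroupsB, ht]
  | cons r rs ih =>
    constructor
    · simp only [rainLoopA]
      split
      · rename_i hr
        rw [zero_add, ih.2 r hr, rainGroupsB]
        simp [hr]
      · rename_i hr
        rw [if_neg (by omega), ih.1, rainGroupsB]
        simp [show ¬ (0 < r) by omega]
    · intro t ht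
      simp only [rainLoopA]
      split
      · rename_i hr
        rw [ih.2 (t + r) (by omega)]
        simp [hr]
        ring
      · rename_i hr
        rw [rainLoopA_append _ ([] ++ [t]), ih.1]
        conv_rhs => rw [rainGroupsB.eq_def]
        simp [show ¬ (0 < r) by omega]

-- ===== VERDICT (by name: the statement is the Claim_ definition above) =====
theorem rain_events_spec : Claim_equal_rain_events := by
  intro rainfalls _
  unfold Spec_rain_events rain_events rain_events_alt
  exact (rainLoopA_eq rainfalls).1
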